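-- pv_equiv track=rewrite | github.com/whisperLiang/torchlens | torchlens/split_engine.py | _compute_descendant_cache
-- ===== SOURCE A (Python) =====
-- from typing import Dict, List, Optional, Sequence, Set, Tuple
--
-- def _forward_reachable(
--     starts: Set[int],
--     children: Dict[int, Set[int]],
--     *,
--     blocked: Optional[Set[int]] = None,
--     candidate_set: Optional[Set[int]] = None,
-- ) -> Set[int]:
--     blocked = blocked or set()
--     visited = set()
--     frontier = [idx for idx in starts if idx not in blocked]
--     while frontier:
--         current = frontier.pop()
--         if current in visited:
--             continue
--         if candidate_set is not None and current not in candidate_set: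
--             continue
--         visited.add(current)
--         for child in children[current]:
--             if child not in blocked and child not in visited:
--                 frontier.append(child)
--     return visited
--
-- def _compute_descendant_cache(
--     candidate_set: Set[int],
--     children: Dict[int, Set[int]],
-- ) -> Dict[int, Set[int]]:
--     cache: Dict[int, Set[int]] = {}
--     for idx in candidate_set:
--         descendants = _forward_reachable({idx}, children, candidate_set=candidate_set)
--         descendants.discard(idx)
--         cache[idx] = descendants
--     return cache
-- ===== SOURCE B (Python) =====
-- def _compute_descendant_cache(candidate_set, children):
--     # One shared fixpoint propagation over a prebuilt candidate-restricted
--     # adjacency table, instead of one DFS per candidate node.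
--     adj = {u: [c for c in children[u] if c in candidate_set] for u in candidate_set}
--     desc = {u: set(adj[u]) for u in candidate_set}
--     while True:
--         new = {u: desc[u] | {v for c in adj[u] for v in desc[c]} for u in candidate_set}
--         if new == desc:
--             break
--         desc = new
--     for u in desc:
--         desc[u].discard(u)
--     return desc
-- ===== Notes on version B (the rewrite author's own statement) =====
-- stated objective: alternative
-- what changed: A runs an independent explicit-stack DFS (with a visited set and per-pop candidate checks) from every candidate node; B first builds one candidate-restricted adjacency table and then computes all descendant sets at once by iterated whole-table fixpoint propagation (new[u] = desc[u] union of desc[c] for c in adj[u], repeated until the table stops changing), discarding u from desc[u] at the end.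
import Mathlib
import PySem

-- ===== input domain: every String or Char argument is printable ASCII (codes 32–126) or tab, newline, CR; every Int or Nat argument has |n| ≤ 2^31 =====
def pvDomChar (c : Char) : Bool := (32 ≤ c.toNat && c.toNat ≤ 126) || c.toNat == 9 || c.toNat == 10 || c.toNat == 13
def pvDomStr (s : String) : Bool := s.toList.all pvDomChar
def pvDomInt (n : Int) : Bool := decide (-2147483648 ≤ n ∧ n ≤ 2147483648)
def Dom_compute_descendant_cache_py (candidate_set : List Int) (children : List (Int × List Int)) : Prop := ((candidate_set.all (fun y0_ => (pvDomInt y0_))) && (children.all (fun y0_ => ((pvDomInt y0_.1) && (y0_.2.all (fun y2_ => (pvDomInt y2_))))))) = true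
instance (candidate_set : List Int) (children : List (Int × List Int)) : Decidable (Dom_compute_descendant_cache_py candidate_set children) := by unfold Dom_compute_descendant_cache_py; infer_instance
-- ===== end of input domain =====

-- B replaces A's independent per-node DFS traversals by ONE shared fixpoint propagation
-- over a prebuilt candidate-restricted adjacency table (objective: alternative algorithm).
-- Python set/dict values have no modelled iteration order: each output set is emitted by
-- both ports as its canonical sorted list, and the output dict in candidate-list order.

-- ===== PORT A =====

-- children[u] (total form; Pre_ excludes the inputs where Python raises KeyError)
def pvChildren (children : List (Int × List Int)) (u : Int) : List Int :=
  ((PySem.Dict.mk children).get? u).getD []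

-- termination measure of the DFS loop (cited by pvDfs's decreasing_by)
theorem pvDfs_measure (C visited : List Int) (current : Int)
    (h1 : current ∉ visited) (h2 : current ∈ C) :
    (C.toFinset \ (visited ++ [current]).toFinset).card < (C.toFinset \ visited.toFinset).card := by
  have hsub : C.toFinset \ (visited ++ [current]).toFinset ⊆ C.toFinset \ visited.toFinset := by
    intro x hx
    simp only [Finset.mem_sdiff, List.mem_toFinset, List.mem_append] at hx ⊢
    exact ⟨hx.1, fun h => hx.2 (Or.inl h)⟩
  apply Finset.card_lt_card
  rw [Finset.ssubset_iff_of_subset hsub]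
  exact ⟨current, by simp [h2, h1], by simp⟩

-- the while-loop of _forward_reachable (blocked = ∅, starts = {idx}); frontier head = top
-- of Python's stack (append+pop at the right end = foldl-cons + pop at the head).
def pvDfs (candidate_set : List Int) (children : List (Int × List Int)) :
    List Int → List Int → List Int
  | [], visited => visited
  | current :: rest, visited =>
    if current ∈ visited then pvDfs candidate_set children rest visited
    else if current ∉ candidate_set then pvDfs candidate_set children rest visited
    else
      let visited' := visited ++ [current]
      let frontier' := (pvChildren children current).foldl
        (fun f c => if c ∈ visited' then f else c :: f) rest
      pvDfs candidate_set children frontier' visited'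
termination_by frontier visited => ((candidate_set.toFinset \ visited.toFinset).card, frontier.length)
decreasing_by
  · apply Prod.Lex.right; simp
  · apply Prod.Lex.right; simp
  · apply Prod.Lex.left
    rename_i hvis hcand
    exact pvDfs_measure _ _ _ hvis (not_not.mp hcand)

def compute_descendant_cache_py (candidate_set : List Int) (children : List (Int × List Int)) : List (Int × List Int) :=
  (candidate_set.foldl
    (fun cache idx =>
      cache.insert idx
        (PySem.List.sorted (PySem.Set.discard (pvDfs candidate_set children [idx] []) idx) (fun x => x) false))
    PySem.Dict.empty).items

-- ===== PORT B =====

-- adj[u] = [c for c in children[u] if c in candidate_set]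
def pvAdj (candidate_set : List Int) (children : List (Int × List Int)) (u : Int) : List Int :=
  (pvChildren children u).filter (fun c => decide (c ∈ candidate_set))

-- {u: f(u) for u in K}
def pvTable (K : List Int) (f : Int → List Int) : PySem.Dict Int (List Int) :=
  K.foldl (fun d u => d.insert u (f u)) PySem.Dict.empty

-- new = {u: desc[u] | {v for c in adj[u] for v in desc[c]} for u in K}
def pvStep (candidate_set : List Int) (children : List (Int × List Int)) (K : List Int)
    (d : PySem.Dict Int (List Int)) : PySem.Dict Int (List Int) :=
  pvTable K (fun u =>
    PySem.Set.union (d.getD u []) ((pvAdj candidate_set children u).flatMap (fun c => d.getD c [])))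

-- while True: new = step(desc); if new == desc: break; desc = new
-- (fuel only makes the loop structurally total; it is proved sufficient below)
def pvPropagate (candidate_set : List Int) (children : List (Int × List Int)) (K : List Int) :
    Nat → PySem.Dict Int (List Int) → PySem.Dict Int (List Int)
  | 0, d => d
  | fuel + 1, d =>
    let d' := pvStep candidate_set children K d
    if d' = d then d else pvPropagate candidate_set children K fuel d'

def compute_descendant_cache_py_alt (candidate_set : List Int) (children : List (Int × List Int)) : List (Int × List Int) :=
  let K := PySem.List.dedup candidate_set
  let d0 := pvTable K (fun u => PySem.Set.ofList (pvAdj candidate_set children u))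
  let dF := pvPropagate candidate_set children K (K.length * K.length + 1) d0
  dF.items.map (fun p => (p.1, PySem.List.sorted (PySem.Set.discard p.2 p.1) (fun x => x) false))

-- ===== PRECONDITION & SPEC =====

-- Pre_ excludes exactly the inputs on which Python A raises KeyError: a candidate node
-- with no entry in the children dict (A looks every candidate up; so does B).
def Pre_compute_descendant_cache_py (candidate_set : List Int) (children : List (Int × List Int)) : Prop :=
  ∀ i ∈ candidate_set, (PySem.Dict.mk children).contains i = true
instance (candidate_set : List Int) (children : List (Int × List Int)) : Decidable (Pre_compute_descendant_cache_py candidate_set children) := by unfold Pre_compute_descendant_cache_py; infer_instance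

def pvWitness_compute_descendant_cache_py : List Int × (List (Int × List Int)) :=
  ([1, 2], [(1, [2, 3]), (2, [1]), (3, [])])

def Spec_compute_descendant_cache_py (candidate_set : List Int) (children : List (Int × List Int)) (out : List (Int × List Int)) : Prop := out = compute_descendant_cache_py_alt candidate_set children
instance (candidate_set : List Int) (children : List (Int × List Int)) (out : List (Int × List Int)) : Decidable (Spec_compute_descendant_cache_py candidate_set children out) := by unfold Spec_compute_descendant_cache_py; infer_instance

-- ===== CLAIM (what is proved, stated in full; the proofs are below) =====
def Claim_equal_compute_descendant_cache_py : Prop := ∀ (candidate_set : List Int) (children : List (Int × List Int)), Dom_compute_descendant_cache_py candidate_set children → Pre_compute_descendant_cache_py candidate_set children → Spec_compute_descendant_cache_py candidate_set children (compute_descendant_cache_py candidate_set children)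

-- ===== LEMMAS AND PROOFS =====

-- edge relations of the two programs: a step of A's DFS, and a step through B's
-- candidate-restricted adjacency table
def pvE (C : List Int) (ch : List (Int × List Int)) (a b : Int) : Prop :=
  a ∈ C ∧ b ∈ pvChildren ch a
def pvE' (C : List Int) (ch : List (Int × List Int)) (a b : Int) : Prop :=
  a ∈ C ∧ b ∈ pvAdj C ch a

-- membership in A's push loop: children pushed unless already visited
theorem pv_mem_pushFold (V : List Int) (l : List Int) :
    ∀ (init : List Int) (v : Int),
      v ∈ l.foldl (fun f c => if c ∈ V then f else c :: f) init ↔ v ∈ init ∨ (v ∈ l ∧ v ∉ V) := by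
  induction l with
  | nil => simp
  | cons c l ih =>
    intro init v
    simp only [List.foldl_cons]
    by_cases hc : c ∈ V
    · rw [if_pos hc, ih]
      constructor
      · rintro (h | h)
        · exact Or.inl h
        · exact Or.inr ⟨List.mem_cons_of_mem _ h.1, h.2⟩
      · rintro (h | ⟨hm, hv⟩)
        · exact Or.inl h
        · rcases List.mem_cons.mp hm with rfl | hm
          · exact absurd hc hv
          · exact Or.inr ⟨hm, hv⟩
    · rw [if_neg hc, ih]
      constructor
      · rintro (h | h)
        · rcases List.mem_cons.mp h with rfl | h
          · exact Or.inr ⟨List.mem_cons_self, hc⟩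
          · exact Or.inl h
        · exact Or.inr ⟨List.mem_cons_of_mem _ h.1, h.2⟩
      · rintro (h | ⟨hm, hv⟩)
        · exact Or.inl (List.mem_cons_of_mem _ h)
        · rcases List.mem_cons.mp hm with rfl | hm
          · exact Or.inl List.mem_cons_self
          · exact Or.inr ⟨hm, hv⟩

-- invariant lemma for A's DFS loop
theorem pvDfs_invariant (C : List Int) (ch : List (Int × List Int)) (idx : Int)
    (hidx : idx ∈ C) :
    ∀ (frontier visited : List Int),
      visited.Nodup →
      (∀ v ∈ visited, v ∈ C ∧ Relation.ReflTransGen (pvE C ch) idx v) →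
      (∀ v ∈ frontier, Relation.ReflTransGen (pvE C ch) idx v) →
      (∀ v ∈ visited, ∀ c ∈ pvChildren ch v, c ∈ C → c ∈ visited ∨ c ∈ frontier) →
      (idx ∈ visited ∨ idx ∈ frontier) →
      (pvDfs C ch frontier visited).Nodup ∧
      (∀ v ∈ pvDfs C ch frontier visited, v ∈ C ∧ Relation.ReflTransGen (pvE C ch) idx v) ∧
      (∀ v ∈ pvDfs C ch frontier visited, ∀ c ∈ pvChildren ch v, c ∈ C → c ∈ pvDfs C ch frontier visited) ∧
      idx ∈ pvDfs C ch frontier visited := by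
  intro frontier visited
  induction frontier, visited using pvDfs.induct (candidate_set := C) (children := ch) with
  | case1 visited =>
    intro hnd hvis _ hcl hstart
    rw [pvDfs]
    refine ⟨hnd, hvis, ?_, ?_⟩
    · intro v hv c hc hcC
      rcases hcl v hv c hc hcC with h | h
      · exact h
      · exact absurd h (List.not_mem_nil)
    · rcases hstart with h | h
      · exact h
      · exact absurd h (List.not_mem_nil)
  | case2 current rest visited hcur ih =>
    intro hnd hvis hfr hcl hstart
    rw [pvDfs, if_pos hcur]
    apply ih hnd hvis (fun v hv => hfr v (List.mem_cons_of_mem _ hv))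
    · intro v hv c hc hcC
      rcases hcl v hv c hc hcC with h | h
      · exact Or.inl h
      · rcases List.mem_cons.mp h with rfl | h
        · exact Or.inl hcur
        · exact Or.inr h
    · rcases hstart with h | h
      · exact Or.inl h
      · rcases List.mem_cons.mp h with rfl | h
        · exact Or.inl hcur
        · exact Or.inr h
  | case3 current rest visited hcur hnc ih =>
    intro hnd hvis hfr hcl hstart
    rw [pvDfs, if_neg hcur, if_pos hnc]
    apply ih hnd hvis (fun v hv => hfr v (List.mem_cons_of_mem _ hv))
    · intro v hv c hc hcC
      rcases hcl v hv c hc hcC with h | h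
      · exact Or.inl h
      · rcases List.mem_cons.mp h with rfl | h
        · exact absurd hcC hnc
        · exact Or.inr h
    · rcases hstart with h | h
      · exact Or.inl h
      · rcases List.mem_cons.mp h with rfl | h
        · exact absurd hidx hnc
        · exact Or.inr h
  | case4 current rest visited hcur hnc visited' frontier' ih =>
    intro hnd hvis hfr hcl hstart
    have hcurC : current ∈ C := not_not.mp hnc
    have hcurR : Relation.ReflTransGen (pvE C ch) idx current := hfr current List.mem_cons_self
    rw [pvDfs, if_neg hcur, if_neg hnc]
    have hveq : visited' = visited ++ [current] := rfl
    have hfeq : frontier' = (pvChildren ch current).foldl (fun f c => if c ∈ visited' then f else c :: f) rest := rfl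
    have hmemv' : ∀ v, v ∈ visited' ↔ v ∈ visited ∨ v = current := by intro v; rw [hveq]; simp
    have h1 : visited'.Nodup := by
      rw [hveq, List.nodup_append]
      refine ⟨hnd, List.nodup_singleton _, ?_⟩
      intro a ha b hb
      rw [List.mem_singleton] at hb
      subst hb
      exact fun h => hcur (h ▸ ha)
    have h2 : ∀ v ∈ visited', v ∈ C ∧ Relation.ReflTransGen (pvE C ch) idx v := by
      intro v hv
      rcases (hmemv' v).mp hv with h | rfl
      · exact hvis v h
      · exact ⟨hcurC, hcurR⟩
    have hpf : ∀ v, v ∈ frontier' ↔ v ∈ rest ∨ (v ∈ pvChildren ch current ∧ v ∉ visited') := by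
      intro v; rw [hfeq]; exact pv_mem_pushFold visited' (pvChildren ch current) rest v
    have h3 : ∀ v ∈ frontier', Relation.ReflTransGen (pvE C ch) idx v := by
      intro v hv
      rcases (hpf v).mp hv with h | ⟨hch, _⟩
      · exact hfr v (List.mem_cons_of_mem _ h)
      · exact hcurR.tail ⟨hcurC, hch⟩
    have h4 : ∀ v ∈ visited', ∀ c ∈ pvChildren ch v, c ∈ C → c ∈ visited' ∨ c ∈ frontier' := by
      intro v hv c hc hcC
      rcases (hmemv' v).mp hv with h | rfl
      · rcases hcl v h c hc hcC with h2' | h2'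
        · exact Or.inl ((hmemv' c).mpr (Or.inl h2'))
        · rcases List.mem_cons.mp h2' with rfl | h2'
          · exact Or.inl ((hmemv' c).mpr (Or.inr rfl))
          · exact Or.inr ((hpf c).mpr (Or.inl h2'))
      · by_cases hcv : c ∈ visited'
        · exact Or.inl hcv
        · exact Or.inr ((hpf c).mpr (Or.inr ⟨hc, hcv⟩))
    have h5 : idx ∈ visited' ∨ idx ∈ frontier' := by
      rcases hstart with h | h
      · exact Or.inl ((hmemv' idx).mpr (Or.inl h))
      · rcases List.mem_cons.mp h with rfl | h
        · exact Or.inl ((hmemv' idx).mpr (Or.inr rfl))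
        · exact Or.inr ((hpf idx).mpr (Or.inl h))
    exact ih h1 h2 h3 h4 h5

-- a closed set containing idx contains everything reachable
theorem pv_complete (C : List Int) (ch : List (Int × List Int)) (idx : Int) (r : List Int)
    (hidx : idx ∈ r)
    (hcl : ∀ v ∈ r, ∀ c ∈ pvChildren ch v, c ∈ C → c ∈ r) :
    ∀ v, Relation.ReflTransGen (pvE C ch) idx v → v ∈ C → v ∈ r := by
  intro v h
  induction h with
  | refl => intro _; exact hidx
  | tail _ hstep ih =>
    intro hvC
    exact hcl _ (ih hstep.1) _ hstep.2 hvC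

-- A's DFS from idx computes exactly the restricted reachable set
theorem pvDfs_run (C : List Int) (ch : List (Int × List Int)) (idx : Int) (hidx : idx ∈ C) :
    (pvDfs C ch [idx] []).Nodup ∧
    (∀ v, v ∈ pvDfs C ch [idx] [] ↔ v ∈ C ∧ Relation.ReflTransGen (pvE C ch) idx v) := by
  have h := pvDfs_invariant C ch idx hidx [idx] []
    (List.nodup_nil) (by simp) (by intro v hv; simp at hv; subst hv; exact Relation.ReflTransGen.refl)
    (by simp) (by simp)
  refine ⟨h.1, fun v => ⟨fun hv => h.2.1 v hv, fun ⟨hvC, hr⟩ => ?_⟩⟩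
  exact pv_complete C ch idx _ h.2.2.2 h.2.2.1 v hr hvC

-- a fold of d[u] = g(u) inserts over any key list builds the dict {u: g(u)} keyed by dedup
theorem pv_items_foldl (l : List Int) (g : Int → List Int) :
    (l.foldl (fun (d : PySem.Dict Int (List Int)) u => d.insert u (g u)) PySem.Dict.empty).items
      = (PySem.List.dedup l).map (fun u => (u, g u)) := by
  induction l using List.reverseRecOn with
  | nil => rfl
  | append_singleton l x ih =>
    rw [List.foldl_append, List.foldl_cons, List.foldl_nil,
      PySem.List.dedup_eq_ofList, PySem.Set.ofList_append_singleton, ← PySem.List.dedup_eq_ofList]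
    have hkeys : (l.foldl (fun (d : PySem.Dict Int (List Int)) u => d.insert u (g u)) PySem.Dict.empty).keys
        = ((PySem.List.dedup l).map (fun u => (u, g u))).map Prod.fst := by
      simp only [PySem.Dict.keys, ih]
    by_cases hx : x ∈ PySem.List.dedup l
    · have hcont : (l.foldl (fun (d : PySem.Dict Int (List Int)) u => d.insert u (g u)) PySem.Dict.empty).contains x = true := by
        rw [PySem.Dict.contains_iff_mem_keys, hkeys]
        simp only [List.map_map]
        exact List.mem_map.mpr ⟨x, hx, rfl⟩
      rw [PySem.Dict.items_insert_of_contains _ _ hcont, ih]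
      have hadd : PySem.Set.add (PySem.List.dedup l) x = PySem.List.dedup l :=
        PySem.Set.add_of_mem hx
      rw [hadd, List.map_map]
      apply List.map_inj_left.mpr
      intro a _
      by_cases hax : a = x
      · subst hax; simp
      · simp [Function.comp, hax]
    · have hcont : (l.foldl (fun (d : PySem.Dict Int (List Int)) u => d.insert u (g u)) PySem.Dict.empty).contains x = false := by
        rw [← Bool.not_eq_true, PySem.Dict.contains_iff_mem_keys, hkeys]
        simp only [List.map_map]
        intro hmem
        rcases List.mem_map.mp hmem with ⟨a, ha, hax⟩
        simp only [Function.comp] at hax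
        exact hx (hax ▸ ha)
      rw [PySem.Dict.items_insert_of_not_contains _ _ hcont, ih]
      have hadd : PySem.Set.add (PySem.List.dedup l) x = PySem.List.dedup l ++ [x] :=
        PySem.Set.add_of_not_mem hx
      rw [hadd, List.map_append]
      rfl

theorem pv_table_items (K : List Int) (f : Int → List Int) (hK : K.Nodup) :
    (pvTable K f).items = K.map (fun u => (u, f u)) := by
  rw [pvTable, pv_items_foldl]
  rw [PySem.List.dedup_eq_ofList, PySem.Set.ofList_eq_self_of_nodup _ hK]

theorem pv_table_keys (K : List Int) (f : Int → List Int) (hK : K.Nodup) :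
    (pvTable K f).keys = K := by
  simp only [PySem.Dict.keys, pv_table_items K f hK, List.map_map]
  rw [show ((fun (p : Int × List Int) => p.1) ∘ fun u => (u, f u)) = id from rfl, List.map_id]

theorem pv_table_getD (K : List Int) (f : Int → List Int) (hK : K.Nodup) {u : Int} (hu : u ∈ K) :
    (pvTable K f).getD u [] = f u := by
  apply PySem.Dict.getD_of_mem_items
  · rw [pv_table_items K f hK]; exact List.mem_map.mpr ⟨u, hu, rfl⟩
  · rw [pv_table_keys K f hK]; exact hK

theorem pv_table_eq_iff (K : List Int) (f g : Int → List Int) (hK : K.Nodup) :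
    pvTable K f = pvTable K g ↔ ∀ u ∈ K, f u = g u := by
  rw [PySem.Dict.ext_iff, pv_table_items K f hK, pv_table_items K g hK, List.map_inj_left]
  constructor
  · intro h u hu; exact congrArg Prod.snd (h u hu)
  · intro h u hu; rw [h u hu]

-- every target of pvE' lies in the candidate set
theorem pvE'_target (C : List Int) (ch : List (Int × List Int)) {a b : Int}
    (h : pvE' C ch a b) : b ∈ C := by
  have := h.2
  simp only [pvAdj, List.mem_filter, decide_eq_true_eq] at this
  exact this.2

theorem pv_trans_targetC (C : List Int) (ch : List (Int × List Int)) {u v : Int}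
    (h : Relation.TransGen (pvE' C ch) u v) : v ∈ C := by
  induction h with
  | single h => exact pvE'_target C ch h
  | tail _ h _ => exact pvE'_target C ch h

-- B's fixpoint propagation: invariants in, reachable-set characterization out
theorem pv_prop_spec (C : List Int) (ch : List (Int × List Int)) (K : List Int)
    (hK : K.Nodup) (hKC : ∀ u, u ∈ K ↔ u ∈ C) :
    ∀ (fuel : Nat) (f : Int → List Int),
      (∀ u ∈ K, (f u).Nodup) →
      (∀ u ∈ K, ∀ v ∈ f u, Relation.TransGen (pvE' C ch) u v) →
      (∀ u ∈ K, ∀ c ∈ pvAdj C ch u, c ∈ f u) →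
      K.length * K.length + 1 ≤ fuel + (K.map (fun u => (f u).length)).sum →
      ∃ g : Int → List Int,
        pvPropagate C ch K fuel (pvTable K f) = pvTable K g ∧
        (∀ u ∈ K, (g u).Nodup) ∧
        (∀ u ∈ K, ∀ v, v ∈ g u ↔ Relation.TransGen (pvE' C ch) u v) := by
  intro fuel
  induction fuel with
  | zero =>
    intro f hnd hsound _ hbound
    exfalso
    have hsub : ∀ u ∈ K, (f u).length ≤ K.length := by
      intro u hu
      have hsubK : ∀ v ∈ f u, v ∈ K := fun v hv =>
        (hKC v).mpr (pv_trans_targetC C ch (hsound u hu v hv))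
      calc (f u).length = (f u).toFinset.card := (List.toFinset_card_of_nodup (hnd u hu)).symm
        _ ≤ K.toFinset.card := Finset.card_le_card (fun x hx => by
            simp only [List.mem_toFinset] at hx ⊢; exact hsubK x hx)
        _ = K.length := List.toFinset_card_of_nodup hK
    have : (K.map (fun u => (f u).length)).sum ≤ K.length * K.length := by
      have h := List.sum_le_card_nsmul (K.map (fun u => (f u).length)) K.length (by
        intro x hx
        rcases List.mem_map.mp hx with ⟨u, hu, rfl⟩
        exact hsub u hu)
      simpa [smul_eq_mul] using h
    omega
  | succ fuel ih =>
    intro f hnd hsound hadj hbound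
    simp only [pvPropagate]
    have hstep : pvStep C ch K (pvTable K f)
        = pvTable K (fun u => PySem.Set.union ((pvTable K f).getD u [])
            ((pvAdj C ch u).flatMap (fun c => (pvTable K f).getD c []))) := rfl
    set F : Int → List Int := fun u => PySem.Set.union ((pvTable K f).getD u [])
        ((pvAdj C ch u).flatMap (fun c => (pvTable K f).getD c [])) with hF
    have hFu : ∀ u ∈ K, F u = PySem.Set.union (f u) ((pvAdj C ch u).flatMap (fun c => (pvTable K f).getD c [])) := by
      intro u hu; simp only [hF]; rw [pv_table_getD K f hK hu]
    have hmemF : ∀ u ∈ K, ∀ v, v ∈ F u ↔ v ∈ f u ∨ ∃ c ∈ pvAdj C ch u, v ∈ f c := by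
      intro u hu v
      rw [hFu u hu, PySem.Set.mem_union]
      constructor
      · rintro (h | h)
        · exact Or.inl h
        · rcases List.mem_flatMap.mp h with ⟨c, hc, hv⟩
          have hcK : c ∈ K := (hKC c).mpr (by
            have := hc; simp only [pvAdj, List.mem_filter, decide_eq_true_eq] at this; exact this.2)
          rw [pv_table_getD K f hK hcK] at hv
          exact Or.inr ⟨c, hc, hv⟩
      · rintro (h | ⟨c, hc, hv⟩)
        · exact Or.inl h
        · refine Or.inr (List.mem_flatMap.mpr ⟨c, hc, ?_⟩)
          have hcK : c ∈ K := (hKC c).mpr (by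
            have := hc; simp only [pvAdj, List.mem_filter, decide_eq_true_eq] at this; exact this.2)
          rw [pv_table_getD K f hK hcK]
          exact hv
    by_cases heq : pvStep C ch K (pvTable K f) = pvTable K f
    · rw [if_pos heq]
      refine ⟨f, rfl, hnd, ?_⟩
      have hfix : ∀ u ∈ K, F u = f u := by
        rw [← pv_table_eq_iff K F f hK, ← hstep]; exact heq
      have hclosed : ∀ u ∈ K, ∀ c ∈ pvAdj C ch u, ∀ v ∈ f c, v ∈ f u := by
        intro u hu c hc v hv
        have : v ∈ F u := (hmemF u hu v).mpr (Or.inr ⟨c, hc, hv⟩)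
        rwa [hfix u hu] at this
      intro u hu v
      refine ⟨fun hv => hsound u hu v hv, fun ht => ?_⟩
      revert hu
      induction ht using Relation.TransGen.head_induction_on with
      | @single a h' =>
        intro haK
        exact hadj a haK v h'.2
      | @head a c h' h2' ih' =>
        intro haK
        exact hclosed a haK c h'.2 v (ih' ((hKC c).mpr (pvE'_target C ch h')))
    · rw [if_neg heq]
      rw [hstep]
      -- invariants for F
      have hndF : ∀ u ∈ K, (F u).Nodup := by
        intro u hu; rw [hFu u hu]; exact PySem.Set.nodup_union _ _ (hnd u hu)
      have hsoundF : ∀ u ∈ K, ∀ v ∈ F u, Relation.TransGen (pvE' C ch) u v := by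
        intro u hu v hv
        rcases (hmemF u hu v).mp hv with h | ⟨c, hc, hv2⟩
        · exact hsound u hu v h
        · have hcK : c ∈ K := (hKC c).mpr (by
            have := hc; simp only [pvAdj, List.mem_filter, decide_eq_true_eq] at this; exact this.2)
          exact Relation.TransGen.head ⟨(hKC u).mp hu, hc⟩ (hsound c hcK v hv2)
      have hadjF : ∀ u ∈ K, ∀ c ∈ pvAdj C ch u, c ∈ F u := by
        intro u hu c hc
        exact (hmemF u hu c).mpr (Or.inl (hadj u hu c hc))
      -- strict growth of the total size
      have huu : ∀ (s t : List Int), PySem.Set.union s t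
          = s ++ ((PySem.Set.ofList t).filter (fun y => !(PySem.Set.contains s y))) :=
        fun s t => PySem.Set.update_eq_append_filter s t
      have hgen : ∀ (s T : List Int), s.length ≤ (s ++ T).length ∧ (s ++ T ≠ s → s.length < (s ++ T).length) := by
        intro s T
        refine ⟨by simp, ?_⟩
        intro hne
        rcases T with _ | ⟨a, T⟩
        · simp at hne
        · simp
      have hlenF : ∀ u ∈ K, (f u).length ≤ (F u).length ∧ (F u ≠ f u → (f u).length < (F u).length) := by
        intro u hu
        rw [hFu u hu, huu]
        exact hgen _ _
      have hex : ∃ u ∈ K, F u ≠ f u := by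
        by_contra hall
        apply heq
        rw [hstep]
        refine (pv_table_eq_iff K F f hK).mpr ?_
        intro u hu
        by_contra hne
        exact hall ⟨u, hu, hne⟩
      have hsum : (K.map (fun u => (f u).length)).sum < (K.map (fun u => (F u).length)).sum := by
        apply List.sum_lt_sum
        · intro u hu; exact (hlenF u hu).1
        · rcases hex with ⟨u, hu, hne⟩
          exact ⟨u, hu, (hlenF u hu).2 hne⟩
      exact ih F hndF hsoundF hadjF (by omega)

-- bridging A's reachability to B's: off the start node the two closures agree
theorem pv_rtg_to_trans (C : List Int) (ch : List (Int × List Int)) {u v : Int}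
    (h : Relation.ReflTransGen (pvE C ch) u v) :
    v ∈ C → (v = u ∨ Relation.TransGen (pvE' C ch) u v) := by
  induction h with
  | refl => intro _; exact Or.inl rfl
  | @tail b c h1 h2 ih =>
    intro hvC
    rcases h2 with ⟨hbC, hchild⟩
    have hstep : pvE' C ch b c := ⟨hbC, by
      simp only [pvAdj, List.mem_filter, decide_eq_true_eq]
      exact ⟨hchild, hvC⟩⟩
    rcases ih hbC with rfl | ht
    · exact Or.inr (Relation.TransGen.single hstep)
    · exact Or.inr (ht.tail hstep)

theorem pv_trans_to_rtg (C : List Int) (ch : List (Int × List Int)) {u v : Int}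
    (h : Relation.TransGen (pvE' C ch) u v) :
    v ∈ C ∧ Relation.ReflTransGen (pvE C ch) u v := by
  induction h with
  | single h =>
    have hb := h.2
    simp only [pvAdj, List.mem_filter, decide_eq_true_eq] at hb
    exact ⟨hb.2, Relation.ReflTransGen.single ⟨h.1, hb.1⟩⟩
  | tail h1 h2 ih =>
    have hb := h2.2
    simp only [pvAdj, List.mem_filter, decide_eq_true_eq] at hb
    exact ⟨hb.2, ih.2.tail ⟨h2.1, hb.1⟩⟩

-- two nodup lists equal off x give equal sorted discards
theorem pv_same_sorted (r s : List Int) (x : Int) (hr : r.Nodup) (hs : s.Nodup)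
    (h : ∀ v, v ≠ x → (v ∈ r ↔ v ∈ s)) :
    PySem.List.sorted (PySem.Set.discard r x) (fun y => y) false
      = PySem.List.sorted (PySem.Set.discard s x) (fun y => y) false := by
  apply PySem.List.sorted_eq_sorted_of_perm _ _ _ (fun a b hab => hab)
  rw [List.perm_ext_iff_of_nodup (PySem.Set.nodup_discard _ _ hr) (PySem.Set.nodup_discard _ _ hs)]
  intro a
  rw [PySem.Set.mem_discard, PySem.Set.mem_discard]
  constructor
  · rintro ⟨ha, hne⟩; exact ⟨(h a hne).mp ha, hne⟩
  · rintro ⟨ha, hne⟩; exact ⟨(h a hne).mpr ha, hne⟩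

-- ===== VERDICT (by name: the statement is the Claim_ definition above) =====
theorem compute_descendant_cache_py_spec : Claim_equal_compute_descendant_cache_py := by
  intro C ch _ _
  unfold Spec_compute_descendant_cache_py
  unfold compute_descendant_cache_py compute_descendant_cache_py_alt
  set K := PySem.List.dedup C with hKdef
  have hK : K.Nodup := PySem.List.nodup_dedup C
  have hKC : ∀ u, u ∈ K ↔ u ∈ C := fun u => PySem.List.mem_dedup C u
  -- A side
  rw [pv_items_foldl]
  -- B side: characterize the propagated table
  obtain ⟨g, hgeq, hgnd, hgmem⟩ :=
    pv_prop_spec C ch K hK hKC (K.length * K.length + 1)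
      (fun u => PySem.Set.ofList (pvAdj C ch u))
      (fun u _ => PySem.Set.nodup_ofList _)
      (by
        intro u hu v hv
        rw [PySem.Set.mem_ofList] at hv
        exact Relation.TransGen.single ⟨(hKC u).mp hu, hv⟩)
      (fun u _ c hc => (PySem.Set.mem_ofList _ _).mpr hc)
      (by omega)
  show List.map (fun u => (u, PySem.List.sorted (PySem.Set.discard (pvDfs C ch [u] []) u) (fun x => x) false)) (PySem.List.dedup C)
      = List.map (fun p => (p.1, PySem.List.sorted (PySem.Set.discard p.2 p.1) (fun x => x) false))
          (pvPropagate C ch K (K.length * K.length + 1) (pvTable K (fun u => PySem.Set.ofList (pvAdj C ch u)))).items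
  rw [hgeq, pv_table_items K g hK, List.map_map, ← hKdef]
  apply List.map_congr_left
  intro u hu
  simp only [Function.comp]
  have huC : u ∈ C := (hKC u).mp hu
  obtain ⟨hnddfs, hmemdfs⟩ := pvDfs_run C ch u huC
  refine congrArg (fun z => (u, z)) ?_
  apply pv_same_sorted _ _ _ hnddfs (hgnd u hu)
  intro v hvne
  rw [hmemdfs v, hgmem u hu v]
  constructor
  · rintro ⟨hvC, hr⟩
    rcases pv_rtg_to_trans C ch hr hvC with rfl | ht
    · exact absurd rfl hvne
    · exact ht
  · intro ht
    exact pv_trans_to_rtg C ch ht
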